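-- pv_equiv track=rewrite | github.com/Aryanmishra-2/sample-aws-marketplace-product-listing | bedrock_agent/marketplace_chatbot.py | _show_progress
-- ===== SOURCE A (Python) =====
-- def _show_progress(message, steps=None, current_step=0):
--     """Show progress indicator with context"""
--     progress_msg = f"⏳ **{message}**\n\n"
--
--     if steps:
--         for i, step in enumerate(steps, 1):
--             if i <= current_step:
--                 progress_msg += f"✅ {step}\n"
--             elif i == current_step + 1:
--                 progress_msg += f"🔄 {step} (in progress...)\n"
--             else:
--                 progress_msg += f"⏸️ {step}\n"
--         progress_msg += "\n"
--
--     progress_msg += "☕ **Please wait while this completes...**\n"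
--     progress_msg += "This may take a few minutes. I'll update you when it's done."
--
--     return progress_msg
-- ===== SOURCE B (Python) =====
-- def _show_progress(message, steps=None, current_step=0):
--     """Show progress indicator with context (region-based rebuild)."""
--     header = f"⏳ **{message}**\n\n"
--     body = ""
--     if steps:
--         n = len(steps)
--         k = min(max(current_step, 0), n)
--         done = "".join(f"✅ {s}\n" for s in steps[:k])
--         if 0 <= current_step < n:
--             cur = f"🔄 {steps[current_step]} (in progress...)\n"
--             rest = steps[current_step + 1:]
--         else:
--             cur = ""
--             rest = steps[k:]
--         pending = "".join(f"⏸️ {s}\n" for s in rest)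
--         body = done + cur + pending + "\n"
--     footer = ("☕ **Please wait while this completes...**\n"
--               "This may take a few minutes. I'll update you when it's done.")
--     return header + body + footer
-- ===== Notes on version B (the rewrite author's own statement) =====
-- stated objective: simpler
-- what changed: Replaces A's single enumerate loop with a per-element three-way index comparison by a region decomposition: clamp current_step to k, render steps[:k] as completed, steps[current_step] as in-progress when 0 <= current_step < len, and the rest as pending, then concatenate the three formatted regions.
import Mathlib
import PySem

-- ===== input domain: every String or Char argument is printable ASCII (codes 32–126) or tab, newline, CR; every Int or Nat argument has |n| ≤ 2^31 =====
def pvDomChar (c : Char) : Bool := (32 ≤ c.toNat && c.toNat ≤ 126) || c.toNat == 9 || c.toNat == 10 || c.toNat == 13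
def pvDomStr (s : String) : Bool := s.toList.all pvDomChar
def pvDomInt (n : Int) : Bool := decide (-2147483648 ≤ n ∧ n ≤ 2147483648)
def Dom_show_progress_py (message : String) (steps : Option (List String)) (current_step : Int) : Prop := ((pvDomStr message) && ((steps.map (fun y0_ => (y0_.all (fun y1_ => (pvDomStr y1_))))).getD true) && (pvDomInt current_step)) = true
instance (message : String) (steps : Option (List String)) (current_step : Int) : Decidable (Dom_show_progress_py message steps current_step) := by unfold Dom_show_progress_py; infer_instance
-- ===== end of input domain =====

-- B rebuilds the message from three contiguous regions (completed / in-progress / pending)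
-- instead of A's single loop with a per-element three-way index comparison; objective: simpler.

-- ===== PORT A =====
def show_progress_py (message : String) (steps : Option (List String)) (current_step : Int) : String :=
  let progress_msg := "⏳ **" ++ message ++ "**\n\n"
  let progress_msg :=
    match steps with
    | some ss =>
      if ss = [] then progress_msg
      else
        ((PySem.List.enumerate ss 1).foldl (fun acc p =>
          if p.1 ≤ current_step then acc ++ "✅ " ++ p.2 ++ "\n"
          else if p.1 = current_step + 1 then acc ++ "🔄 " ++ p.2 ++ " (in progress...)\n"
          else acc ++ "⏸️ " ++ p.2 ++ "\n") progress_msg) ++ "\n"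
    | none => progress_msg
  progress_msg ++ "☕ **Please wait while this completes...**\n"
    ++ "This may take a few minutes. I'll update you when it's done."

-- ===== PORT B =====
def show_progress_py_alt (message : String) (steps : Option (List String)) (current_step : Int) : String :=
  let header := "⏳ **" ++ message ++ "**\n\n"
  let body :=
    match steps with
    | some ss =>
      if ss = [] then ""
      else
        let n : Int := ss.length
        let k : Int := min (max current_step 0) n
        let done := String.join ((PySem.List.slice ss (some 0) (some k)).map
          (fun s => "✅ " ++ s ++ "\n"))
        let cur_rest : String × List String :=
          if 0 ≤ current_step ∧ current_step < n then
            ("🔄 " ++ (PySem.List.pyGet? ss current_step).getD "" ++ " (in progress...)\n",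
             PySem.List.slice ss (some (current_step + 1)) none)
          else ("", PySem.List.slice ss (some k) none)
        let pending := String.join (cur_rest.2.map (fun s => "⏸️ " ++ s ++ "\n"))
        done ++ cur_rest.1 ++ pending ++ "\n"
    | none => ""
  header ++ body ++ "☕ **Please wait while this completes...**\n"
    ++ "This may take a few minutes. I'll update you when it's done."

-- ===== PRECONDITION & SPEC =====
def Spec_show_progress_py (message : String) (steps : Option (List String)) (current_step : Int) (out : String) : Prop := out = show_progress_py_alt message steps current_step
instance (message : String) (steps : Option (List String)) (current_step : Int) (out : String) : Decidable (Spec_show_progress_py message steps current_step out) := by unfold Spec_show_progress_py; infer_instance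

-- ===== CLAIM (what is proved, stated in full; the proofs are below) =====
def Claim_equal_show_progress_py : Prop := ∀ (message : String) (steps : Option (List String)) (current_step : Int), Dom_show_progress_py message steps current_step → Spec_show_progress_py message steps current_step (show_progress_py message steps current_step)

-- ===== LEMMAS AND PROOFS =====

def pvLineDone (s : String) : String := "✅ " ++ s ++ "\n"
def pvLineCur (s : String) : String := "🔄 " ++ s ++ " (in progress...)\n"
def pvLinePend (s : String) : String := "⏸️ " ++ s ++ "\n"

/-- A's loop body rendered relative to the current step: `c = current_step - i + 1`. -/
def pvR : List String → Int → String
  | [], _ => ""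
  | s :: t, c =>
      (if 1 ≤ c then pvLineDone s else if c = 0 then pvLineCur s else pvLinePend s) ++ pvR t (c - 1)

theorem pv_join_foldl (l : List String) (a b : String) :
    l.foldl (· ++ ·) (a ++ b) = a ++ l.foldl (· ++ ·) b := by
  induction l generalizing b with
  | nil => rfl
  | cons x t ih => simp only [List.foldl_cons, String.append_assoc, ih]

theorem pv_join_cons (s : String) (l : List String) :
    String.join (s :: l) = s ++ String.join l := by
  simp only [String.join, List.foldl_cons]
  have := pv_join_foldl l s ""
  simpa using this

theorem pv_foldA (ss : List String) (cs : Int) (i : Int) (acc : String) :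
    (PySem.List.enumerate ss i).foldl (fun acc p =>
        if p.1 ≤ cs then acc ++ "✅ " ++ p.2 ++ "\n"
        else if p.1 = cs + 1 then acc ++ "🔄 " ++ p.2 ++ " (in progress...)\n"
        else acc ++ "⏸️ " ++ p.2 ++ "\n") acc
      = acc ++ pvR ss (cs - i + 1) := by
  induction ss generalizing i acc with
  | nil => simp [PySem.List.enumerate_nil, pvR]
  | cons s t ih =>
    rw [PySem.List.enumerate_cons, List.foldl_cons, ih]
    have h1 : (i ≤ cs) = (1 ≤ cs - i + 1) := by
      apply propext; constructor <;> intro <;> omega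
    have h2 : (i = cs + 1) = (cs - i + 1 = 0) := by
      apply propext; constructor <;> intro <;> omega
    have h3 : cs - (i + 1) + 1 = cs - i + 1 - 1 := by omega
    simp only [pvR, h3]
    by_cases hd : 1 ≤ cs - i + 1
    · rw [if_pos (by omega : i ≤ cs), if_pos hd]
      simp [pvLineDone, String.append_assoc]
    · by_cases hc : cs - i + 1 = 0
      · rw [if_neg (by omega : ¬ i ≤ cs), if_pos (by omega : i = cs + 1), if_neg hd, if_pos hc]
        simp [pvLineCur, String.append_assoc]
      · rw [if_neg (by omega : ¬ i ≤ cs), if_neg (by omega : ¬ i = cs + 1), if_neg hd, if_neg hc]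
        simp [pvLinePend, String.append_assoc]

theorem pv_R_neg (ss : List String) (c : Int) (h : c < 0) :
    pvR ss c = String.join (ss.map pvLinePend) := by
  induction ss generalizing c with
  | nil => simp [pvR, String.join]
  | cons s t ih =>
    simp only [pvR, if_neg (by omega : ¬ 1 ≤ c), if_neg (by omega : ¬ c = 0), List.map_cons,
      pv_join_cons, ih (c - 1) (by omega)]

theorem pv_R_ge (ss : List String) (c : Int) (h : (ss.length : Int) ≤ c) :
    pvR ss c = String.join (ss.map pvLineDone) := by
  induction ss generalizing c with
  | nil => simp [pvR, String.join]
  | cons s t ih =>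
    have hl : ((s :: t).length : Int) = (t.length : Int) + 1 := by simp
    simp only [pvR, if_pos (by rw [hl] at h; omega : 1 ≤ c), List.map_cons, pv_join_cons,
      ih (c - 1) (by rw [hl] at h; omega)]

theorem pv_R_mid (ss : List String) (c : Int) (h0 : 0 ≤ c) (h1 : c < (ss.length : Int)) :
    pvR ss c = String.join ((ss.take c.toNat).map pvLineDone)
      ++ (pvLineCur (ss.getD c.toNat ""))
      ++ String.join ((ss.drop (c.toNat + 1)).map pvLinePend) := by
  induction ss generalizing c with
  | nil => simp at h1; omega
  | cons s t ih =>
    by_cases hc : c = 0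
    · subst hc
      rw [show pvR (s :: t) 0 = pvLineCur s ++ pvR t (0 - 1) by simp [pvR]]
      rw [pv_R_neg t (0 - 1) (by omega)]
      simp [String.join]
    · have hge : 1 ≤ c := by omega
      have hlen : ((s :: t).length : Int) = (t.length : Int) + 1 := by simp
      have htn : c.toNat = (c - 1).toNat + 1 := by omega
      simp only [pvR, if_pos hge]
      rw [ih (c - 1) (by omega) (by rw [hlen] at h1; omega), htn]
      simp [pv_join_cons, String.append_assoc]

theorem pv_footer_cong (a b : String) (h : a = b) :
    a ++ "☕ **Please wait while this completes...**\n"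
      ++ "This may take a few minutes. I'll update you when it's done."
    = b ++ "☕ **Please wait while this completes...**\n"
      ++ "This may take a few minutes. I'll update you when it's done." := by rw [h]

-- ===== VERDICT (by name: the statement is the Claim_ definition above) =====
theorem show_progress_py_spec : Claim_equal_show_progress_py := by
  intro message steps cs _
  show show_progress_py message steps cs = show_progress_py_alt message steps cs
  unfold show_progress_py show_progress_py_alt
  match steps with
  | none => simp
  | some ss =>
    by_cases hss : ss = []
    · simp [hss]
    · simp only [if_neg hss]
      apply pv_footer_cong
      rw [pv_foldA ss cs 1]
      have hR : cs - 1 + 1 = cs := by omega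
      rw [hR]
      by_cases hneg : cs < 0
    -- pending-only region
      · rw [pv_R_neg ss cs hneg]
        have hk : min (max cs 0) (ss.length : Int) = 0 := by
          have : 0 ≤ (ss.length : Int) := by positivity
          omega
        rw [if_neg (by omega : ¬ (0 ≤ cs ∧ cs < (ss.length : Int)))]
        simp only [hk]
        rw [PySem.List.slice_zero_start ss, PySem.List.slice_zero_start ss,
          PySem.List.slice_to ss (by omega : (0:Int) ≤ 0), PySem.List.slice_none_none ss]
        simp [String.join, show pvLinePend = (fun s : String => "⏸️ " ++ s ++ "\n") from rfl, String.append_assoc]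
      · by_cases hlt : cs < (ss.length : Int)
        -- mid region
        · rw [pv_R_mid ss cs (by omega) hlt]
          have hk : min (max cs 0) (ss.length : Int) = cs := by omega
          rw [if_pos ⟨by omega, hlt⟩]
          simp only [hk]
          rw [PySem.List.slice_zero_start ss, PySem.List.slice_to ss (by omega : (0:Int) ≤ cs),
            PySem.List.slice_from ss (by omega : (0:Int) ≤ cs + 1)]
          have hc : cs = ((cs.toNat : Nat) : Int) := by omega
          have hget : PySem.List.pyGet? ss cs = ss[cs.toNat]? := by
            conv_lhs => rw [hc]
            exact PySem.List.pyGet?_natCast ss cs.toNat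
          have hdrop : (cs + 1).toNat = cs.toNat + 1 := by omega
          rw [hget, hdrop]
          simp [show pvLineDone = (fun s : String => "✅ " ++ s ++ "\n") from rfl, show pvLineCur = (fun s : String => "🔄 " ++ s ++ " (in progress...)\n") from rfl, show pvLinePend = (fun s : String => "⏸️ " ++ s ++ "\n") from rfl, List.getD, String.append_assoc]
        -- all-done region
        · rw [pv_R_ge ss cs (by omega)]
          have hk : min (max cs 0) (ss.length : Int) = (ss.length : Int) := by omega
          rw [if_neg (by omega : ¬ (0 ≤ cs ∧ cs < (ss.length : Int)))]
          simp only [hk]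
          rw [PySem.List.slice_zero_start ss, PySem.List.slice_to ss (by omega : (0:Int) ≤ (ss.length : Int)),
            PySem.List.slice_from ss (by omega : (0:Int) ≤ (ss.length : Int))]
          simp [String.join, show pvLineDone = (fun s : String => "✅ " ++ s ++ "\n") from rfl, String.append_assoc]
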